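-- pv_equiv track=rewrite | github.com/Rohitjanardhan21/Talentscout | utils/interactive_question_selector.py | _filter_questions_by_preferences
-- ===== SOURCE A (Python) =====
-- from typing import Dict, List, Any, Optional
--
-- def _filter_questions_by_preferences(
--                                    questions: List[str],
--                                    difficulty_level: str,
--                                    focus_areas: List[str],
--                                    candidate_data: Dict[str, Any]) -> List[str]:
--     """Filter questions based on difficulty and focus areas"""
--
--     # For now, return all questions - in a real implementation,
--     # questions would be tagged with difficulty and category metadata
--     filtered = questions.copy()
--
--     # Adjust based on difficulty level
--     experience_years = candidate_data.get('experience_years', 3)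
--
--     if difficulty_level == 'junior' and experience_years > 5:
--         # Mix in some easier questions for senior candidates who want junior-level questions
--         pass
--     elif difficulty_level == 'expert' and experience_years < 5:
--         # Filter out very advanced questions for less experienced candidates
--         pass
--
--     # Filter based on focus areas
--     if 'real_world' in focus_areas:
--         # Prioritize questions that ask about experience
--         real_world_indicators = ['experience', 'project', 'worked', 'used', 'approach']
--         filtered = [q for q in filtered if any(indicator in q.lower() for indicator in real_world_indicators)] + filtered
--
--     if 'problem_solving' in focus_areas:
--         # Prioritize debugging and problem-solving questions
--         problem_indicators = ['debug', 'problem', 'issue', 'challenge', 'solve', 'optimize']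
--         filtered = [q for q in filtered if any(indicator in q.lower() for indicator in problem_indicators)] + filtered
--
--     # Remove duplicates while preserving order
--     seen = set()
--     unique_filtered = []
--     for q in filtered:
--         if q not in seen:
--             seen.add(q)
--             unique_filtered.append(q)
--
--     return unique_filtered
-- ===== SOURCE B (Python) =====
-- def _filter_questions_by_preferences(questions, difficulty_level, focus_areas, candidate_data):
--     """Dedup once, then one stable sort by a 4-valued priority rank."""
--     rw = ['experience', 'project', 'worked', 'used', 'approach'] if 'real_world' in focus_areas else []
--     ps = ['debug', 'problem', 'issue', 'challenge', 'solve', 'optimize'] if 'problem_solving' in focus_areas else []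
--
--     def rank(q):
--         ql = q.lower()
--         p = any(ind in ql for ind in ps)
--         r = any(ind in ql for ind in rw)
--         return 0 if p and r else 1 if p else 2 if r else 3
--
--     return sorted(dict.fromkeys(questions), key=rank)
-- ===== Notes on version B (the rewrite author's own statement) =====
-- stated objective: simpler
-- what changed: Instead of A's cascade of prioritizing list concatenations (building an up-to-4x-long intermediate list) followed by a seen-set dedup pass, B deduplicates the questions once and does a single stable sort by a 4-valued priority rank computed per question.
import Mathlib
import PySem

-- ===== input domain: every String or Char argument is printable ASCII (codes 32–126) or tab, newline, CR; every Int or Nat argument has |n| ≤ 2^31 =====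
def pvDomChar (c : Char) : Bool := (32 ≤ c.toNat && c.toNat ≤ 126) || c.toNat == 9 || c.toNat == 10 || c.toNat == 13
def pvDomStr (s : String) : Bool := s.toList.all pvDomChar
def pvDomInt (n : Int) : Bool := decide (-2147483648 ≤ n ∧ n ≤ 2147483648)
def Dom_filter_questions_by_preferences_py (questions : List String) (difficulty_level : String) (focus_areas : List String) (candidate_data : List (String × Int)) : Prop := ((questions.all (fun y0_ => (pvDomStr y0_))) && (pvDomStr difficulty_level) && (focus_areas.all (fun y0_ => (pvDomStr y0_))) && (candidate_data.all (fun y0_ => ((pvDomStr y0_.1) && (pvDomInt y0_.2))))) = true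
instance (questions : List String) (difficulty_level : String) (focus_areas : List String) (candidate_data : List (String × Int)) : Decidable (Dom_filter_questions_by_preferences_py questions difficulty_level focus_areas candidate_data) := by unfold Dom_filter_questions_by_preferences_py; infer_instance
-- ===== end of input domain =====

-- B replaces A's cascade of prioritizing list concatenations + final seen-set dedup pass
-- by a single first-occurrence dedup followed by one stable sort on a 4-valued priority rank (simpler).


-- ===== PORT A =====
def pvRwIndicators : List String := ["experience", "project", "worked", "used", "approach"]
def pvPsIndicators : List String := ["debug", "problem", "issue", "challenge", "solve", "optimize"]

-- any(indicator in q.lower() for indicator in inds)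
def pvMatchesAny (inds : List String) (q : String) : Bool :=
  inds.any (fun ind => PySem.Str.isIn ind (PySem.Str.lower q))

def filter_questions_by_preferences_py (questions : List String) (difficulty_level : String) (focus_areas : List String) (candidate_data : List (String × Int)) : List String :=
  let filtered := questions
  let experience_years : Int := PySem.Dict.getD ⟨candidate_data⟩ "experience_years" 3
  -- both difficulty_level/experience_years branches of the Python are 'pass'; the condition is evaluated and discarded
  let _ := (difficulty_level == "junior" && decide (experience_years > 5)) ||
           (difficulty_level == "expert" && decide (experience_years < 5))
  let filtered := if focus_areas.contains "real_world" then
      filtered.filter (pvMatchesAny pvRwIndicators) ++ filtered else filtered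
  let filtered := if focus_areas.contains "problem_solving" then
      filtered.filter (pvMatchesAny pvPsIndicators) ++ filtered else filtered
  -- seen = set(); unique_filtered = []; for q in filtered: if q not in seen: seen.add(q); unique_filtered.append(q)
  (filtered.foldl (fun (st : PySem.Set String × List String) q =>
      if st.1.contains q then st else (PySem.Set.add st.1 q, st.2 ++ [q]))
    (PySem.Set.empty, [])).2

-- ===== PORT B =====
def pvRank (ps rw : List String) (q : String) : Int :=
  let ql := PySem.Str.lower q
  let p := ps.any (fun ind => PySem.Str.isIn ind ql)
  let r := rw.any (fun ind => PySem.Str.isIn ind ql)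
  if p && r then 0 else if p then 1 else if r then 2 else 3

def filter_questions_by_preferences_py_alt (questions : List String) (difficulty_level : String) (focus_areas : List String) (candidate_data : List (String × Int)) : List String :=
  let rw := if focus_areas.contains "real_world" then pvRwIndicators else []
  let ps := if focus_areas.contains "problem_solving" then pvPsIndicators else []
  PySem.List.sorted (PySem.List.dedup questions) (pvRank ps rw)

-- ===== PRECONDITION & SPEC =====
def Spec_filter_questions_by_preferences_py (questions : List String) (difficulty_level : String) (focus_areas : List String) (candidate_data : List (String × Int)) (out : List String) : Prop := out = filter_questions_by_preferences_py_alt questions difficulty_level focus_areas candidate_data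
instance (questions : List String) (difficulty_level : String) (focus_areas : List String) (candidate_data : List (String × Int)) (out : List String) : Decidable (Spec_filter_questions_by_preferences_py questions difficulty_level focus_areas candidate_data out) := by unfold Spec_filter_questions_by_preferences_py; infer_instance

-- ===== CLAIM (what is proved, stated in full; the proofs are below) =====
def Claim_equal_filter_questions_by_preferences_py : Prop := ∀ (questions : List String) (difficulty_level : String) (focus_areas : List String) (candidate_data : List (String × Int)), Dom_filter_questions_by_preferences_py questions difficulty_level focus_areas candidate_data → Spec_filter_questions_by_preferences_py questions difficulty_level focus_areas candidate_data (filter_questions_by_preferences_py questions difficulty_level focus_areas candidate_data)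

-- ===== LEMMAS AND PROOFS =====

-- The state list only grows along A's Set.add fold.
theorem pvPrefix_foldl_add {α : Type} [BEq α] (l : List α) (s : List α) :
    s <+: l.foldl PySem.Set.add s := by
  induction l generalizing s with
  | nil => simp
  | cons q l ih =>
      refine List.IsPrefix.trans ?_ (ih (PySem.Set.add s q))
      by_cases h : s.contains q <;> simp [PySem.Set.add, PySem.Set.contains, h]

-- A's seen/unique dedup loop, relative to arbitrary seeds: the output list is the new part of the seen set.
theorem pvLoop_eq_update {α : Type} [BEq α] (l : List α) (s u : List α) :
    (l.foldl (fun (st : PySem.Set α × List α) q =>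
        if st.1.contains q then st else (PySem.Set.add st.1 q, st.2 ++ [q])) (s, u)).2
      = u ++ (l.foldl PySem.Set.add s).drop s.length := by
  induction l generalizing s u with
  | nil => simp
  | cons q l ih =>
      rw [List.foldl_cons, List.foldl_cons]
      by_cases h : s.contains q
      · have h' : PySem.Set.contains s q = true := h
        rw [if_pos h', ih]
        have hadd : PySem.Set.add s q = s := by simp [PySem.Set.add, PySem.Set.contains, h]
        rw [hadd]
      · have h' : ¬ PySem.Set.contains s q = true := h
        rw [if_neg h', ih]
        have hadd : PySem.Set.add s q = s ++ [q] := by simp [PySem.Set.add, PySem.Set.contains, h]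
        rw [hadd]
        obtain ⟨w, hw⟩ := pvPrefix_foldl_add l (s ++ [q])
        rw [← hw, List.drop_left]
        rw [show (s ++ [q]) ++ w = s ++ (q :: w) by simp, List.drop_left]
        simp

-- The Set.add fold appends, in first-occurrence order, the deduped elements not yet seen.
theorem pvFoldl_add_eq {α : Type} [BEq α] [LawfulBEq α] (l : List α) (s : List α) :
    l.foldl PySem.Set.add s = s ++ (PySem.List.dedup l).filter (fun y => !(s.contains y)) := by
  induction l generalizing s with
  | nil => simp [PySem.List.dedup, PySem.Set.ofList_eq_foldl]
  | cons x l ih =>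
      have hded : PySem.List.dedup (x :: l)
          = [x] ++ (PySem.List.dedup l).filter (fun y => !(([x] : List α).contains y)) := by
        rw [PySem.List.dedup_eq_ofList, PySem.Set.ofList_eq_foldl, List.foldl_cons]
        have : PySem.Set.add ([] : List α) x = [x] := by simp [PySem.Set.add]
        rw [this, ih]
      rw [List.foldl_cons, ih, hded]
      by_cases h : s.contains x
      · have hmem : x ∈ s := List.mem_of_elem_eq_true h
        have hax : PySem.Set.add s x = s := by simp [PySem.Set.add, PySem.Set.contains, hmem]
        rw [hax]
        have hfx : ([x].filter (fun y => !s.contains y)) = ([] : List α) := by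
          simp [List.filter, hmem]
        rw [List.filter_append, hfx, List.filter_filter, List.nil_append]
        refine congrArg (s ++ ·) ?_
        refine List.filter_congr ?_
        intro y hy
        by_cases hyx : y = x
        · subst hyx; simp [hmem]
        · simp [hyx]
      · have hnmem : x ∉ s := fun m => h (List.elem_eq_true_of_mem m)
        have hax : PySem.Set.add s x = s ++ [x] := by
          simp [PySem.Set.add, PySem.Set.contains, hnmem]
        rw [hax]
        have hfx : ([x].filter (fun y => !s.contains y)) = [x] := by
          simp [List.filter, hnmem]
        rw [List.filter_append, hfx, List.filter_filter, List.append_assoc]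
        refine congrArg (s ++ ·) ?_
        refine congrArg ([x] ++ ·) ?_
        refine List.filter_congr ?_
        intro y hy
        by_cases hys : y ∈ s <;> by_cases hyx : y = x <;> simp [hys, hyx]

theorem pvDedup_cons {α : Type} [BEq α] [LawfulBEq α] (x : α) (l : List α) :
    PySem.List.dedup (x :: l) = x :: (PySem.List.dedup l).filter (fun y => !(y == x)) := by
  rw [PySem.List.dedup_eq_ofList, PySem.Set.ofList_eq_foldl, List.foldl_cons]
  have h0 : PySem.Set.add ([] : List α) x = [x] := by simp [PySem.Set.add]
  rw [h0, pvFoldl_add_eq]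
  rw [show ([x] : List α) ++ (PySem.List.dedup l).filter (fun y => !([x] : List α).contains y)
        = x :: (PySem.List.dedup l).filter (fun y => !([x] : List α).contains y) by simp]
  refine congrArg (x :: ·) (List.filter_congr ?_)
  intro y hy
  by_cases hyx : y = x <;> simp [hyx]

theorem pvDedup_append {α : Type} [BEq α] [LawfulBEq α] (a b : List α) :
    PySem.List.dedup (a ++ b)
      = PySem.List.dedup a ++ (PySem.List.dedup b).filter (fun y => !(a.contains y)) := by
  rw [PySem.List.dedup_eq_ofList, PySem.Set.ofList_eq_foldl, List.foldl_append,
      ← PySem.Set.ofList_eq_foldl, ← PySem.List.dedup_eq_ofList, pvFoldl_add_eq]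
  refine congrArg (PySem.List.dedup a ++ ·) (List.filter_congr ?_)
  intro y hy
  by_cases hya : y ∈ a
  · simp [hya]
  · simp [hya]

-- first-occurrence dedup commutes with filtering
theorem pvDedup_filter {α : Type} [BEq α] [LawfulBEq α] (f : α → Bool) (l : List α) :
    PySem.List.dedup (l.filter f) = (PySem.List.dedup l).filter f := by
  induction l with
  | nil => rfl
  | cons x l ih =>
      by_cases hf : f x = true
      · rw [List.filter_cons, if_pos hf, pvDedup_cons, ih, pvDedup_cons, List.filter_cons,
            if_pos hf, List.filter_filter, List.filter_filter]
        refine congrArg (x :: ·) (List.filter_congr ?_)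
        intro y hy
        cases hyb : (y == x) <;> cases hfy : f y <;> simp
      · rw [List.filter_cons, if_neg hf, ih, pvDedup_cons, List.filter_cons, if_neg hf,
            List.filter_filter]
        refine List.filter_congr ?_
        intro y hy
        cases hfy : f y
        · simp
        · have hyx : (y == x) = false := by
            refine beq_false_of_ne ?_
            intro he
            subst he
            exact hf hfy
          simp [hyx]

-- A's "matches first, then everything" pass, deduped, splits the deduped list by the predicate.
theorem pvDedup_prioritize {α : Type} [BEq α] [LawfulBEq α] (f : α → Bool) (l : List α) :
    PySem.List.dedup (l.filter f ++ l)
      = (PySem.List.dedup l).filter f ++ (PySem.List.dedup l).filter (fun y => !(f y)) := by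
  rw [pvDedup_append, pvDedup_filter]
  refine congrArg ((PySem.List.dedup l).filter f ++ ·) (List.filter_congr ?_)
  intro y hy
  have hyl : y ∈ l := (PySem.List.mem_dedup l y).mp hy
  cases hfy : f y
  · have : y ∉ l.filter f := by simp [List.mem_filter, hfy]
    simp [this]
  · have : y ∈ l.filter f := List.mem_filter.mpr ⟨hyl, hfy⟩
    simp [this]

theorem pvInsertBy_front {α : Type} (before : α → α → Bool) (x : α) (m : List α)
    (h : ∀ y ∈ m, before x y = true) :
    PySem.List.insertBy before x m = x :: m := by
  cases m with
  | nil => simp [PySem.List.insertBy]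
  | cons y ys => simp [PySem.List.insertBy, h y (by simp)]

theorem pvInsertBy_skip {α : Type} (before : α → α → Bool) (x : α) (l m : List α)
    (h : ∀ y ∈ l, before x y = false) :
    PySem.List.insertBy before x (l ++ m) = l ++ PySem.List.insertBy before x m := by
  induction l with
  | nil => simp
  | cons y ys ih =>
      simp only [List.cons_append, PySem.List.insertBy, h y (by simp)]
      simp [ih (fun z hz => h z (by simp [hz]))]

-- a stable sort by a key with values in {0,1,2,3} is the concatenation of the four rank groups
theorem pvSorted_rank4 {α : Type} (xs : List α) (key : α → Int)
    (hk : ∀ x ∈ xs, key x = 0 ∨ key x = 1 ∨ key x = 2 ∨ key x = 3) :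
    PySem.List.sorted xs key
      = xs.filter (fun x => key x == 0) ++ xs.filter (fun x => key x == 1)
        ++ xs.filter (fun x => key x == 2) ++ xs.filter (fun x => key x == 3) := by
  rw [PySem.List.sorted_eq_foldl_insertBy]
  induction xs using List.reverseRecOn with
  | nil => simp
  | append_singleton xs x ih =>
      have hk' : ∀ y ∈ xs, key y = 0 ∨ key y = 1 ∨ key y = 2 ∨ key y = 3 :=
        fun y hy => hk y (by simp [hy])
      rw [List.foldl_append, List.foldl_cons, List.foldl_nil, ih hk']
      have m0 : ∀ y ∈ xs.filter (fun x => key x == 0), key y = 0 := by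
        intro y hy; have := (List.mem_filter.mp hy).2; simpa using this
      have m1 : ∀ y ∈ xs.filter (fun x => key x == 1), key y = 1 := by
        intro y hy; have := (List.mem_filter.mp hy).2; simpa using this
      have m2 : ∀ y ∈ xs.filter (fun x => key x == 2), key y = 2 := by
        intro y hy; have := (List.mem_filter.mp hy).2; simpa using this
      have m3 : ∀ y ∈ xs.filter (fun x => key x == 3), key y = 3 := by
        intro y hy; have := (List.mem_filter.mp hy).2; simpa using this
      rcases hk x (by simp) with h | h | h | h
      · -- key x = 0 : skip the rank-0 block, go in front of the rest
        rw [show xs.filter (fun x => key x == 0) ++ xs.filter (fun x => key x == 1)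
              ++ xs.filter (fun x => key x == 2) ++ xs.filter (fun x => key x == 3)
            = xs.filter (fun x => key x == 0) ++ (xs.filter (fun x => key x == 1)
              ++ xs.filter (fun x => key x == 2) ++ xs.filter (fun x => key x == 3)) by simp]
        rw [pvInsertBy_skip _ _ _ _ (by intro y hy; simp [m0 y hy, h]),
            pvInsertBy_front _ _ _ (by
              intro y hy
              rcases List.mem_append.mp hy with hy' | hy'
              · rcases List.mem_append.mp hy' with hy'' | hy''
                · simp [m1 y hy'', h]
                · simp [m2 y hy'', h]
              · simp [m3 y hy', h])]
        simp [List.filter_append, h]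
      · rw [show xs.filter (fun x => key x == 0) ++ xs.filter (fun x => key x == 1)
              ++ xs.filter (fun x => key x == 2) ++ xs.filter (fun x => key x == 3)
            = (xs.filter (fun x => key x == 0) ++ xs.filter (fun x => key x == 1))
              ++ (xs.filter (fun x => key x == 2) ++ xs.filter (fun x => key x == 3)) by simp]
        rw [pvInsertBy_skip _ _ _ _ (by
              intro y hy
              rcases List.mem_append.mp hy with hy' | hy'
              · simp [m0 y hy', h]
              · simp [m1 y hy', h]),
            pvInsertBy_front _ _ _ (by
              intro y hy
              rcases List.mem_append.mp hy with hy' | hy'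
              · simp [m2 y hy', h]
              · simp [m3 y hy', h])]
        simp [List.filter_append, h]
      · rw [show xs.filter (fun x => key x == 0) ++ xs.filter (fun x => key x == 1)
              ++ xs.filter (fun x => key x == 2) ++ xs.filter (fun x => key x == 3)
            = (xs.filter (fun x => key x == 0) ++ xs.filter (fun x => key x == 1)
              ++ xs.filter (fun x => key x == 2)) ++ xs.filter (fun x => key x == 3) by simp]
        rw [pvInsertBy_skip _ _ _ _ (by
              intro y hy
              rcases List.mem_append.mp hy with hy' | hy'
              · rcases List.mem_append.mp hy' with hy'' | hy''
                · simp [m0 y hy'', h]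
                · simp [m1 y hy'', h]
              · simp [m2 y hy', h]),
            pvInsertBy_front _ _ _ (fun y hy => by simp [m3 y hy, h])]
        simp [List.filter_append, h]
      · rw [PySem.List.insertBy_of_forall_not_before _ _ _ (by
              intro y hy
              rcases List.mem_append.mp hy with hy' | hy'
              · rcases List.mem_append.mp hy' with hy'' | hy''
                · rcases List.mem_append.mp hy'' with h3 | h3
                  · simp [m0 y h3, h]
                  · simp [m1 y h3, h]
                · simp [m2 y hy'', h]
              · simp [m3 y hy', h])]
        simp [List.filter_append, h]

theorem pvRank_eq (ps rw : List String) (q : String) :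
    pvRank ps rw q =
      if pvMatchesAny ps q && pvMatchesAny rw q then 0
      else if pvMatchesAny ps q then 1
      else if pvMatchesAny rw q then 2 else 3 := rfl

theorem pvRank_mem (ps rw : List String) (q : String) :
    pvRank ps rw q = 0 ∨ pvRank ps rw q = 1 ∨ pvRank ps rw q = 2 ∨ pvRank ps rw q = 3 := by
  rw [pvRank_eq]
  cases pvMatchesAny ps q <;> cases pvMatchesAny rw q <;> simp

theorem pvFilterMatchesNil (l : List String) : l.filter (pvMatchesAny []) = [] := by
  simp [pvMatchesAny]

-- the heart of the equivalence: A's two prioritizing passes + dedup = B's stable 4-rank sort of the deduped list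
theorem pvEquivCore (qs ps rw : List String) :
    PySem.List.dedup ((qs.filter (pvMatchesAny rw) ++ qs).filter (pvMatchesAny ps)
        ++ (qs.filter (pvMatchesAny rw) ++ qs))
      = PySem.List.sorted (PySem.List.dedup qs) (pvRank ps rw) := by
  rw [pvDedup_prioritize, pvDedup_prioritize]
  rw [pvSorted_rank4 _ _ (fun x _ => pvRank_mem ps rw x)]
  simp only [List.filter_append, List.filter_filter, List.append_assoc]
  have e0 : (PySem.List.dedup qs).filter
        (fun a => pvMatchesAny ps a && pvMatchesAny rw a)
      = (PySem.List.dedup qs).filter (fun x => pvRank ps rw x == 0) := by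
    refine List.filter_congr ?_
    intro y _
    rw [pvRank_eq]
    cases hp : pvMatchesAny ps y <;> cases hr : pvMatchesAny rw y <;> simp
  have e1 : (PySem.List.dedup qs).filter
        (fun a => pvMatchesAny ps a && !pvMatchesAny rw a)
      = (PySem.List.dedup qs).filter (fun x => pvRank ps rw x == 1) := by
    refine List.filter_congr ?_
    intro y _
    rw [pvRank_eq]
    cases hp : pvMatchesAny ps y <;> cases hr : pvMatchesAny rw y <;> simp
  have e2 : (PySem.List.dedup qs).filter
        (fun a => (!pvMatchesAny ps a) && pvMatchesAny rw a)
      = (PySem.List.dedup qs).filter (fun x => pvRank ps rw x == 2) := by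
    refine List.filter_congr ?_
    intro y _
    rw [pvRank_eq]
    cases hp : pvMatchesAny ps y <;> cases hr : pvMatchesAny rw y <;> simp
  have e3 : (PySem.List.dedup qs).filter
        (fun a => (!pvMatchesAny ps a) && !pvMatchesAny rw a)
      = (PySem.List.dedup qs).filter (fun x => pvRank ps rw x == 3) := by
    refine List.filter_congr ?_
    intro y _
    rw [pvRank_eq]
    cases hp : pvMatchesAny ps y <;> cases hr : pvMatchesAny rw y <;> simp
  rw [e0, e1, e2, e3]

-- ===== VERDICT (by name: the statement is the Claim_ definition above) =====
theorem filter_questions_by_preferences_py_spec : Claim_equal_filter_questions_by_preferences_py := by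
  unfold Claim_equal_filter_questions_by_preferences_py
  intro questions difficulty_level focus_areas candidate_data _
  unfold Spec_filter_questions_by_preferences_py
  simp only [filter_questions_by_preferences_py, filter_questions_by_preferences_py_alt]
  rw [pvLoop_eq_update]
  simp only [PySem.Set.empty, List.length_nil, List.drop_zero, List.nil_append]
  rw [pvFoldl_add_eq]
  simp only [List.contains_nil, Bool.not_false, List.filter_true, List.nil_append]
  by_cases hr : focus_areas.contains "real_world" = true <;>
    by_cases hp : focus_areas.contains "problem_solving" = true <;>
      simp only [hr, hp, if_true]
  · exact pvEquivCore questions pvPsIndicators pvRwIndicators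
  · have h := pvEquivCore questions [] pvRwIndicators
    simp only [pvFilterMatchesNil, List.nil_append] at h
    exact h
  · have h := pvEquivCore questions pvPsIndicators []
    simp only [pvFilterMatchesNil, List.nil_append] at h
    exact h
  · have h := pvEquivCore questions [] []
    simp only [pvFilterMatchesNil, List.nil_append] at h
    exact h
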